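-- pv_equiv track=rewrite | github.com/Bartenderr/tools-hub | apps/excel_consolidator/excel_consolidator_app.py | find_column_mapping
-- ===== SOURCE A (Python) =====
-- def find_column_mapping(columns):
--     """Intelligently map column names to required fields"""
--     mapping = {}
--     columns_lower = [col.lower().strip() for col in columns]
--
--     patterns = {
--         'tariff_name': ['tariff name', 'tariff_name', 'name', 'item name', 'procedure'],
--         'tariff_type': ['tariff type', 'tariff_type', 'type', 'category', 'class'],
--         'snomed_code': ['snomed code', 'snomed_code', 'code', 'snomed', 'procedure code'],
--         'snomed_description': ['snomed description en', 'snomed description', 'snomed_description', 'description', 'desc', 'procedure description']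
--     }
--
--     for field, possible_names in patterns.items():
--         for i, col_lower in enumerate(columns_lower):
--             for pattern in possible_names:
--                 if pattern == col_lower:
--                     mapping[field] = columns[i]
--                     break
--             if field in mapping:
--                 break
--
--     return mapping
-- ===== SOURCE B (Python) =====
-- PATTERNS = [
--     ('tariff_name', ['tariff name', 'tariff_name', 'name', 'item name', 'procedure']),
--     ('tariff_type', ['tariff type', 'tariff_type', 'type', 'category', 'class']),
--     ('snomed_code', ['snomed code', 'snomed_code', 'code', 'snomed', 'procedure code']),
--     ('snomed_description', ['snomed description en', 'snomed description', 'snomed_description', 'description', 'desc', 'procedure description']),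
-- ]
--
-- # inverted index: pattern string -> field name (patterns are pairwise distinct)
-- INVERTED = {p: f for f, ps in PATTERNS for p in ps}
--
--
-- def find_column_mapping(columns):
--     """Intelligently map column names to required fields"""
--     found = {}
--     for col in columns:
--         f = INVERTED.get(col.lower().strip())
--         if f is not None and f not in found:
--             found[f] = col
--     return {f: found[f] for f, _ps in PATTERNS if f in found}
-- ===== Notes on version B (the rewrite author's own statement) =====
-- stated objective: faster
-- what changed: Replaces the field-by-field rescan of all columns (nested loops with breaks) by a precomputed inverted pattern->field dict and a single first-match pass over the columns, emitting the result in field order.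
import Mathlib
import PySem

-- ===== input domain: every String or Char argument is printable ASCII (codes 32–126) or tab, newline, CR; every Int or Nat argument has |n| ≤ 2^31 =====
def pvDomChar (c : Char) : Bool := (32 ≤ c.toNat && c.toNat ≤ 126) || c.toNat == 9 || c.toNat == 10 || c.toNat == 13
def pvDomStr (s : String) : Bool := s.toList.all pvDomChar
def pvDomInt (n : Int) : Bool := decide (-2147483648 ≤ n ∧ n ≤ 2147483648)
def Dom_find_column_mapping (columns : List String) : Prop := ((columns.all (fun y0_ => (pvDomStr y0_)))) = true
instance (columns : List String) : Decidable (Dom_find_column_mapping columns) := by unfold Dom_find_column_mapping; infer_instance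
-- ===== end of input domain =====

-- B replaces A's per-field rescans of the columns by an inverted pattern->field dict and one pass over the columns (measured faster in a timing run; same results).

-- the patterns table (shared data of both programs)
def pvPatterns : List (String × List String) :=
  [("tariff_name", ["tariff name", "tariff_name", "name", "item name", "procedure"]),
   ("tariff_type", ["tariff type", "tariff_type", "type", "category", "class"]),
   ("snomed_code", ["snomed code", "snomed_code", "code", "snomed", "procedure code"]),
   ("snomed_description", ["snomed description en", "snomed description", "snomed_description", "description", "desc", "procedure description"])]

-- col.lower().strip()
def pvNorm (s : String) : String := PySem.Str.strip (PySem.Str.lower s)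

-- ===== PORT A =====
-- 'for i, col_lower in enumerate(columns_lower): for pattern: if pattern == col_lower: mapping[field]=columns[i]; break; if field in mapping: break'
def pvScanA (m : PySem.Dict String String) (field : String) (names : List String) :
    List (String × String) → PySem.Dict String String
  | [] => m
  | (cl, c) :: rest =>
      if names.any (fun p => p == cl) then m.insert field c
      else pvScanA m field names rest

def find_column_mapping (columns : List String) : List (String × String) :=
  let columns_lower := columns.map pvNorm
  (pvPatterns.foldl (fun m fn => pvScanA m fn.1 fn.2 (columns_lower.zip columns))
    PySem.Dict.empty).items

-- ===== PORT B =====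
-- INVERTED = {p: f for f, ps in PATTERNS for p in ps}
def pvInverted : PySem.Dict String String :=
  pvPatterns.foldl (fun d fn => fn.2.foldl (fun d p => d.insert p fn.1) d) PySem.Dict.empty

def find_column_mapping_alt (columns : List String) : List (String × String) :=
  let found := columns.foldl (fun fd c =>
      match pvInverted.get? (pvNorm c) with
      | some f => if fd.contains f then fd else fd.insert f c
      | none => fd) PySem.Dict.empty
  pvPatterns.filterMap (fun fn => (found.get? fn.1).map (fun c => (fn.1, c)))

-- ===== PRECONDITION & SPEC =====
def Spec_find_column_mapping (columns : List String) (out : List (String × String)) : Prop := out = find_column_mapping_alt columns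
instance (columns : List String) (out : List (String × String)) : Decidable (Spec_find_column_mapping columns out) := by unfold Spec_find_column_mapping; infer_instance

-- ===== CLAIM (what is proved, stated in full; the proofs are below) =====
def Claim_equal_find_column_mapping : Prop := ∀ (columns : List String), Dom_find_column_mapping columns → Spec_find_column_mapping columns (find_column_mapping columns)


-- ===== LEMMAS AND PROOFS =====

-- pvInverted evaluated (the comprehension builds exactly this literal dict)
def pvInvLit : PySem.Dict String String := PySem.Dict.mk [("tariff name","tariff_name"),("tariff_name","tariff_name"),("name","tariff_name"),("item name","tariff_name"),("procedure","tariff_name"),("tariff type","tariff_type"),("tariff_type","tariff_type"),("type","tariff_type"),("category","tariff_type"),("class","tariff_type"),("snomed code","snomed_code"),("snomed_code","snomed_code"),("code","snomed_code"),("snomed","snomed_code"),("procedure code","snomed_code"),("snomed description en","snomed_description"),("snomed description","snomed_description"),("snomed_description","snomed_description"),("description","snomed_description"),("desc","snomed_description"),("procedure description","snomed_description")]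

theorem inv_eq_lit : pvInverted = pvInvLit := by decide

-- looking up a normalized column in the inverted dict succeeds with field "tariff_name" iff the column matches one of its patterns
theorem pvG1 (s : String) : (pvInverted.get? s == some "tariff_name") = (["tariff name", "tariff_name", "name", "item name", "procedure"].any (fun p => p == s)) := by
  by_cases h1 : ("tariff name" == s) = true
  · obtain rfl := eq_of_beq h1; decide
  by_cases h2 : ("tariff_name" == s) = true
  · obtain rfl := eq_of_beq h2; decide
  by_cases h3 : ("name" == s) = true
  · obtain rfl := eq_of_beq h3; decide
  by_cases h4 : ("item name" == s) = true
  · obtain rfl := eq_of_beq h4; decide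
  by_cases h5 : ("procedure" == s) = true
  · obtain rfl := eq_of_beq h5; decide
  by_cases h6 : ("tariff type" == s) = true
  · obtain rfl := eq_of_beq h6; decide
  by_cases h7 : ("tariff_type" == s) = true
  · obtain rfl := eq_of_beq h7; decide
  by_cases h8 : ("type" == s) = true
  · obtain rfl := eq_of_beq h8; decide
  by_cases h9 : ("category" == s) = true
  · obtain rfl := eq_of_beq h9; decide
  by_cases h10 : ("class" == s) = true
  · obtain rfl := eq_of_beq h10; decide
  by_cases h11 : ("snomed code" == s) = true
  · obtain rfl := eq_of_beq h11; decide
  by_cases h12 : ("snomed_code" == s) = true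
  · obtain rfl := eq_of_beq h12; decide
  by_cases h13 : ("code" == s) = true
  · obtain rfl := eq_of_beq h13; decide
  by_cases h14 : ("snomed" == s) = true
  · obtain rfl := eq_of_beq h14; decide
  by_cases h15 : ("procedure code" == s) = true
  · obtain rfl := eq_of_beq h15; decide
  by_cases h16 : ("snomed description en" == s) = true
  · obtain rfl := eq_of_beq h16; decide
  by_cases h17 : ("snomed description" == s) = true
  · obtain rfl := eq_of_beq h17; decide
  by_cases h18 : ("snomed_description" == s) = true
  · obtain rfl := eq_of_beq h18; decide
  by_cases h19 : ("description" == s) = true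
  · obtain rfl := eq_of_beq h19; decide
  by_cases h20 : ("desc" == s) = true
  · obtain rfl := eq_of_beq h20; decide
  by_cases h21 : ("procedure description" == s) = true
  · obtain rfl := eq_of_beq h21; decide
  simp only [Bool.not_eq_true] at h1 h2 h3 h4 h5 h6 h7 h8 h9 h10 h11 h12 h13 h14 h15 h16 h17 h18 h19 h20 h21
  rw [inv_eq_lit]
  simp [pvInvLit, PySem.Dict.get?, h1, h2, h3, h4, h5, h6, h7, h8, h9, h10, h11, h12, h13, h14, h15, h16, h17, h18, h19, h20, h21]

-- looking up a normalized column in the inverted dict succeeds with field "tariff_type" iff the column matches one of its patterns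
theorem pvG2 (s : String) : (pvInverted.get? s == some "tariff_type") = (["tariff type", "tariff_type", "type", "category", "class"].any (fun p => p == s)) := by
  by_cases h1 : ("tariff name" == s) = true
  · obtain rfl := eq_of_beq h1; decide
  by_cases h2 : ("tariff_name" == s) = true
  · obtain rfl := eq_of_beq h2; decide
  by_cases h3 : ("name" == s) = true
  · obtain rfl := eq_of_beq h3; decide
  by_cases h4 : ("item name" == s) = true
  · obtain rfl := eq_of_beq h4; decide
  by_cases h5 : ("procedure" == s) = true
  · obtain rfl := eq_of_beq h5; decide
  by_cases h6 : ("tariff type" == s) = true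
  · obtain rfl := eq_of_beq h6; decide
  by_cases h7 : ("tariff_type" == s) = true
  · obtain rfl := eq_of_beq h7; decide
  by_cases h8 : ("type" == s) = true
  · obtain rfl := eq_of_beq h8; decide
  by_cases h9 : ("category" == s) = true
  · obtain rfl := eq_of_beq h9; decide
  by_cases h10 : ("class" == s) = true
  · obtain rfl := eq_of_beq h10; decide
  by_cases h11 : ("snomed code" == s) = true
  · obtain rfl := eq_of_beq h11; decide
  by_cases h12 : ("snomed_code" == s) = true
  · obtain rfl := eq_of_beq h12; decide
  by_cases h13 : ("code" == s) = true
  · obtain rfl := eq_of_beq h13; decide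
  by_cases h14 : ("snomed" == s) = true
  · obtain rfl := eq_of_beq h14; decide
  by_cases h15 : ("procedure code" == s) = true
  · obtain rfl := eq_of_beq h15; decide
  by_cases h16 : ("snomed description en" == s) = true
  · obtain rfl := eq_of_beq h16; decide
  by_cases h17 : ("snomed description" == s) = true
  · obtain rfl := eq_of_beq h17; decide
  by_cases h18 : ("snomed_description" == s) = true
  · obtain rfl := eq_of_beq h18; decide
  by_cases h19 : ("description" == s) = true
  · obtain rfl := eq_of_beq h19; decide
  by_cases h20 : ("desc" == s) = true
  · obtain rfl := eq_of_beq h20; decide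
  by_cases h21 : ("procedure description" == s) = true
  · obtain rfl := eq_of_beq h21; decide
  simp only [Bool.not_eq_true] at h1 h2 h3 h4 h5 h6 h7 h8 h9 h10 h11 h12 h13 h14 h15 h16 h17 h18 h19 h20 h21
  rw [inv_eq_lit]
  simp [pvInvLit, PySem.Dict.get?, h1, h2, h3, h4, h5, h6, h7, h8, h9, h10, h11, h12, h13, h14, h15, h16, h17, h18, h19, h20, h21]

-- looking up a normalized column in the inverted dict succeeds with field "snomed_code" iff the column matches one of its patterns
theorem pvG3 (s : String) : (pvInverted.get? s == some "snomed_code") = (["snomed code", "snomed_code", "code", "snomed", "procedure code"].any (fun p => p == s)) := by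
  by_cases h1 : ("tariff name" == s) = true
  · obtain rfl := eq_of_beq h1; decide
  by_cases h2 : ("tariff_name" == s) = true
  · obtain rfl := eq_of_beq h2; decide
  by_cases h3 : ("name" == s) = true
  · obtain rfl := eq_of_beq h3; decide
  by_cases h4 : ("item name" == s) = true
  · obtain rfl := eq_of_beq h4; decide
  by_cases h5 : ("procedure" == s) = true
  · obtain rfl := eq_of_beq h5; decide
  by_cases h6 : ("tariff type" == s) = true
  · obtain rfl := eq_of_beq h6; decide
  by_cases h7 : ("tariff_type" == s) = true
  · obtain rfl := eq_of_beq h7; decide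
  by_cases h8 : ("type" == s) = true
  · obtain rfl := eq_of_beq h8; decide
  by_cases h9 : ("category" == s) = true
  · obtain rfl := eq_of_beq h9; decide
  by_cases h10 : ("class" == s) = true
  · obtain rfl := eq_of_beq h10; decide
  by_cases h11 : ("snomed code" == s) = true
  · obtain rfl := eq_of_beq h11; decide
  by_cases h12 : ("snomed_code" == s) = true
  · obtain rfl := eq_of_beq h12; decide
  by_cases h13 : ("code" == s) = true
  · obtain rfl := eq_of_beq h13; decide
  by_cases h14 : ("snomed" == s) = true
  · obtain rfl := eq_of_beq h14; decide
  by_cases h15 : ("procedure code" == s) = true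
  · obtain rfl := eq_of_beq h15; decide
  by_cases h16 : ("snomed description en" == s) = true
  · obtain rfl := eq_of_beq h16; decide
  by_cases h17 : ("snomed description" == s) = true
  · obtain rfl := eq_of_beq h17; decide
  by_cases h18 : ("snomed_description" == s) = true
  · obtain rfl := eq_of_beq h18; decide
  by_cases h19 : ("description" == s) = true
  · obtain rfl := eq_of_beq h19; decide
  by_cases h20 : ("desc" == s) = true
  · obtain rfl := eq_of_beq h20; decide
  by_cases h21 : ("procedure description" == s) = true
  · obtain rfl := eq_of_beq h21; decide
  simp only [Bool.not_eq_true] at h1 h2 h3 h4 h5 h6 h7 h8 h9 h10 h11 h12 h13 h14 h15 h16 h17 h18 h19 h20 h21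
  rw [inv_eq_lit]
  simp [pvInvLit, PySem.Dict.get?, h1, h2, h3, h4, h5, h6, h7, h8, h9, h10, h11, h12, h13, h14, h15, h16, h17, h18, h19, h20, h21]

-- looking up a normalized column in the inverted dict succeeds with field "snomed_description" iff the column matches one of its patterns
theorem pvG4 (s : String) : (pvInverted.get? s == some "snomed_description") = (["snomed description en", "snomed description", "snomed_description", "description", "desc", "procedure description"].any (fun p => p == s)) := by
  by_cases h1 : ("tariff name" == s) = true
  · obtain rfl := eq_of_beq h1; decide
  by_cases h2 : ("tariff_name" == s) = true
  · obtain rfl := eq_of_beq h2; decide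
  by_cases h3 : ("name" == s) = true
  · obtain rfl := eq_of_beq h3; decide
  by_cases h4 : ("item name" == s) = true
  · obtain rfl := eq_of_beq h4; decide
  by_cases h5 : ("procedure" == s) = true
  · obtain rfl := eq_of_beq h5; decide
  by_cases h6 : ("tariff type" == s) = true
  · obtain rfl := eq_of_beq h6; decide
  by_cases h7 : ("tariff_type" == s) = true
  · obtain rfl := eq_of_beq h7; decide
  by_cases h8 : ("type" == s) = true
  · obtain rfl := eq_of_beq h8; decide
  by_cases h9 : ("category" == s) = true
  · obtain rfl := eq_of_beq h9; decide
  by_cases h10 : ("class" == s) = true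
  · obtain rfl := eq_of_beq h10; decide
  by_cases h11 : ("snomed code" == s) = true
  · obtain rfl := eq_of_beq h11; decide
  by_cases h12 : ("snomed_code" == s) = true
  · obtain rfl := eq_of_beq h12; decide
  by_cases h13 : ("code" == s) = true
  · obtain rfl := eq_of_beq h13; decide
  by_cases h14 : ("snomed" == s) = true
  · obtain rfl := eq_of_beq h14; decide
  by_cases h15 : ("procedure code" == s) = true
  · obtain rfl := eq_of_beq h15; decide
  by_cases h16 : ("snomed description en" == s) = true
  · obtain rfl := eq_of_beq h16; decide
  by_cases h17 : ("snomed description" == s) = true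
  · obtain rfl := eq_of_beq h17; decide
  by_cases h18 : ("snomed_description" == s) = true
  · obtain rfl := eq_of_beq h18; decide
  by_cases h19 : ("description" == s) = true
  · obtain rfl := eq_of_beq h19; decide
  by_cases h20 : ("desc" == s) = true
  · obtain rfl := eq_of_beq h20; decide
  by_cases h21 : ("procedure description" == s) = true
  · obtain rfl := eq_of_beq h21; decide
  simp only [Bool.not_eq_true] at h1 h2 h3 h4 h5 h6 h7 h8 h9 h10 h11 h12 h13 h14 h15 h16 h17 h18 h19 h20 h21
  rw [inv_eq_lit]
  simp [pvInvLit, PySem.Dict.get?, h1, h2, h3, h4, h5, h6, h7, h8, h9, h10, h11, h12, h13, h14, h15, h16, h17, h18, h19, h20, h21]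

-- A's inner double loop with breaks assigns field := first column whose normalization matches a pattern
theorem pvScanA_eq (m : PySem.Dict String String) (f : String) (ns : List String) :
    ∀ cols : List String, pvScanA m f ns ((cols.map pvNorm).zip cols) =
      match cols.find? (fun c => ns.any (fun p => p == pvNorm c)) with
      | some c => m.insert f c
      | none => m := by
  intro cols
  induction cols with
  | nil => rfl
  | cons c rest ih =>
    simp only [List.map_cons, List.zip_cons_cons, pvScanA, List.find?]
    by_cases h : ns.any (fun p => p == pvNorm c)
    · simp [h]
    · simp only [h]; simp [ih]

theorem pvFind?_congr {l : List String} {p q : String → Bool} (h : ∀ x, p x = q x) :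
    l.find? p = l.find? q := by
  induction l with
  | nil => rfl
  | cons c rest ih => simp only [List.find?, h c, ih]

-- B's single pass records, per field, the first matching column
theorem pvFoundB_get (f : String) :
    ∀ (cols : List String) (fd : PySem.Dict String String),
      (cols.foldl (fun fd c =>
          match pvInverted.get? (pvNorm c) with
          | some g => if fd.contains g then fd else fd.insert g c
          | none => fd) fd).get? f =
        ((fd.get? f).orElse
          (fun _ => cols.find? (fun c => pvInverted.get? (pvNorm c) == some f))) := by
  intro cols
  induction cols with
  | nil =>
    intro fd
    simp only [List.foldl_nil, List.find?_nil]
    cases fd.get? f <;> rfl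
  | cons c rest ih =>
    intro fd
    simp only [List.foldl_cons, List.find?]
    rcases hinv : pvInverted.get? (pvNorm c) with _ | g
    · simp [ih]
    · by_cases hg : g = f
      · subst hg
        simp only [BEq.rfl]
        by_cases hc : fd.contains g
        · rcases hv : fd.get? g with _ | v
          · rw [PySem.Dict.get?_eq_none_iff_contains] at hv; simp [hv] at hc
          · simp [hc, ih, hv, Option.orElse]
        · simp only [Bool.not_eq_true] at hc
          rw [(PySem.Dict.get?_eq_none_iff_contains fd g).mpr hc]
          simp only [hc, Bool.false_eq_true, if_false, ih,
            PySem.Dict.get?_insert_self]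
          rfl
      · have hne : (some g == some f) = false := by
          simp [hg]
        simp only [hne]
        by_cases hc : fd.contains g
        · simp [hc, ih]
        · simp only [hc, Bool.false_eq_true, if_false, ih,
            PySem.Dict.get?_insert_of_ne fd c (fun h => hg h.symm)]

theorem pv_main (cols : List String) :
    find_column_mapping cols = find_column_mapping_alt cols := by
  unfold find_column_mapping find_column_mapping_alt
  simp only [pvPatterns, List.foldl_cons, List.foldl_nil, List.filterMap_cons, List.filterMap_nil]
  rw [pvScanA_eq, pvScanA_eq, pvScanA_eq, pvScanA_eq]
  rw [pvFoundB_get "tariff_name" cols PySem.Dict.empty]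
  rw [pvFoundB_get "tariff_type" cols PySem.Dict.empty]
  rw [pvFoundB_get "snomed_code" cols PySem.Dict.empty]
  rw [pvFoundB_get "snomed_description" cols PySem.Dict.empty]
  simp only [PySem.Dict.get?_empty]
  rw [show ((none : Option String).orElse (fun _ => cols.find? (fun c => pvInverted.get? (pvNorm c) == some "tariff_name"))) = cols.find? (fun c => pvInverted.get? (pvNorm c) == some "tariff_name") from rfl]
  rw [pvFind?_congr (fun c => pvG1 (pvNorm c))]
  rw [show ((none : Option String).orElse (fun _ => cols.find? (fun c => pvInverted.get? (pvNorm c) == some "tariff_type"))) = cols.find? (fun c => pvInverted.get? (pvNorm c) == some "tariff_type") from rfl]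
  rw [pvFind?_congr (fun c => pvG2 (pvNorm c))]
  rw [show ((none : Option String).orElse (fun _ => cols.find? (fun c => pvInverted.get? (pvNorm c) == some "snomed_code"))) = cols.find? (fun c => pvInverted.get? (pvNorm c) == some "snomed_code") from rfl]
  rw [pvFind?_congr (fun c => pvG3 (pvNorm c))]
  rw [show ((none : Option String).orElse (fun _ => cols.find? (fun c => pvInverted.get? (pvNorm c) == some "snomed_description"))) = cols.find? (fun c => pvInverted.get? (pvNorm c) == some "snomed_description") from rfl]
  rw [pvFind?_congr (fun c => pvG4 (pvNorm c))]
  rcases cols.find? (fun c => ["tariff name", "tariff_name", "name", "item name", "procedure"].any (fun p => p == pvNorm c)) with _ | c1 <;>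
    rcases cols.find? (fun c => ["tariff type", "tariff_type", "type", "category", "class"].any (fun p => p == pvNorm c)) with _ | c2 <;>
    rcases cols.find? (fun c => ["snomed code", "snomed_code", "code", "snomed", "procedure code"].any (fun p => p == pvNorm c)) with _ | c3 <;>
    rcases cols.find? (fun c => ["snomed description en", "snomed description", "snomed_description", "description", "desc", "procedure description"].any (fun p => p == pvNorm c)) with _ | c4 <;>
    simp [PySem.Dict.items_insert, PySem.Dict.empty, PySem.Dict.contains]


-- ===== VERDICT (by name: the statement is the Claim_ definition above) =====
theorem find_column_mapping_spec : Claim_equal_find_column_mapping := by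
  intro columns _
  unfold Spec_find_column_mapping
  exact pv_main columns
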